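-- pv_equiv track=rewrite | github.com/Assan29/LEET_CODES-Random-50Q- | LEET_CODES(Random 50Q).py | lc_1165
-- ===== SOURCE A (Python) =====
-- def lc_1165(keyboard,word):
--
--         '''
--         There is a special keyboard with all keys in a single row.
--         Given a string keyboard of length 26 indicating the layout of the keyboard (indexed from 0 to 25),
--         initially your finger is at index 0. To type a character, you have to move your finger to the index of the desired
--         character. The time taken to move your finger from index i to index j is |i - j|.
--         You want to type a string word. Write a function to calculate how much time it takes to type it with one finger.
--
--         Example
--         Input: keyboard = "abcdefghijklmnopqrstuvwxyz", word = "cba"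
--         Output: 4
--         Explanation: The index moves from 0 to 2 to write 'c' then to 1 to write 'b' then to 0 again to write 'a'.
--         Total time = 2 + 1 + 1 = 4.
--         '''
--
--         x = 0
--         y = 0
--         for i in word:
--             a = keyboard.index(i)
--             x += abs(a-y)
--             y = a
--
--         return x
-- ===== SOURCE B (Python) =====
-- def lc_1165(keyboard, word):
--     # Gap-crossing algorithm: the total travel time equals, summed over every
--     # unit gap of the keyboard, the number of finger moves that cross that gap.
--     # Record each move as +1/-1 in a difference array, then one prefix-sum
--     # sweep accumulates all crossing counts into the total.
--     diff = [0] * (len(keyboard) + 1)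
--     prev = 0
--     for c in word:
--         cur = keyboard.index(c)
--         lo, hi = (prev, cur) if prev <= cur else (cur, prev)
--         diff[lo] += 1
--         diff[hi] -= 1
--         prev = cur
--     total = 0
--     crossing = 0
--     for d in diff:
--         crossing += d
--         total += crossing
--     return total
-- ===== Notes on version B (the rewrite author's own statement) =====
-- stated objective: alternative
-- what changed: Replaces direct accumulation of |cur-prev| distances with a gap-crossing algorithm: each move is recorded as a +1/-1 pair in a difference array over the keyboard's unit gaps, and a final prefix-sum sweep counts how many moves cross each gap, summing the crossing counts into the total.
import Mathlib
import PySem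

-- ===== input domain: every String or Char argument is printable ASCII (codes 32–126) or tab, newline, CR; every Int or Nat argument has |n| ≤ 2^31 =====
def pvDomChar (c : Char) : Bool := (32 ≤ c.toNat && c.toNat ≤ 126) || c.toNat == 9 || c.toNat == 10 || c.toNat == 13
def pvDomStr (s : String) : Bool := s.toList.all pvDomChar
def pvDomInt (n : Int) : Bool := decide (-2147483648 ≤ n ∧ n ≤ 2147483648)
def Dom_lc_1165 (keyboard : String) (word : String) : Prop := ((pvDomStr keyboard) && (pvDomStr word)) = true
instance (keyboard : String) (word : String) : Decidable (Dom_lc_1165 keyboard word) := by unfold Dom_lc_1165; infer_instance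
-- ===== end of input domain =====

-- B replaces A's direct accumulation of |cur-prev| by a gap-crossing algorithm
-- (difference array over keyboard gaps + prefix-sum sweep); alternative, same cost.

-- ===== PORT A =====
-- stateful loop: state (x, y) = (accumulated time, previous index); a = keyboard.index(i)
def lc_1165 (keyboard : String) (word : String) : Int :=
  (word.toList.foldl
    (fun (st : Int × Int) (i : Char) =>
      let a : Int := PySem.Chars.find keyboard.toList [i]
      (st.1 + |a - st.2|, a))
    (0, 0)).1

-- ===== PORT B =====
-- hand port of "diff[i] += v": exact for the in-range nonnegative indices B produces
def pvSet (l : List Int) (i : Nat) (v : Int) : List Int :=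
  match l, i with
  | [], _ => []
  | d :: ds, 0 => (d + v) :: ds
  | d :: ds, i + 1 => d :: pvSet ds i v

-- diff = [0]*(len(keyboard)+1); record each move as +1 at lo, -1 at hi; then sweep:
-- crossing += d; total += crossing
def lc_1165_alt (keyboard : String) (word : String) : Int :=
  let kb := keyboard.toList
  let st := word.toList.foldl
    (fun (st : List Int × Int) (c : Char) =>
      let cur : Int := PySem.Chars.find kb [c]
      let lohi := if st.2 ≤ cur then (st.2, cur) else (cur, st.2)
      (pvSet (pvSet st.1 lohi.1.toNat 1) lohi.2.toNat (-1), cur))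
    (List.replicate (kb.length + 1) (0 : Int), 0)
  (st.1.foldl (fun (p : Int × Int) d => (p.1 + d, p.2 + (p.1 + d))) (0, 0)).2

-- ===== PRECONDITION & SPEC =====
-- Pre_ excludes words containing a character absent from keyboard: there Python's
-- str.index raises ValueError in A (and in B alike).
def Pre_lc_1165 (keyboard : String) (word : String) : Prop :=
  (word.toList.all (fun c => keyboard.toList.contains c)) = true
instance (keyboard : String) (word : String) : Decidable (Pre_lc_1165 keyboard word) := by
  unfold Pre_lc_1165; infer_instance

def pvWitness_lc_1165 : String × String := ("abc", "cba")

def Spec_lc_1165 (keyboard : String) (word : String) (out : Int) : Prop := out = lc_1165_alt keyboard word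
instance (keyboard : String) (word : String) (out : Int) : Decidable (Spec_lc_1165 keyboard word out) := by unfold Spec_lc_1165; infer_instance

-- ===== CLAIM (what is proved, stated in full; the proofs are below) =====
def Claim_equal_lc_1165 : Prop := ∀ (keyboard : String) (word : String), Dom_lc_1165 keyboard word → Pre_lc_1165 keyboard word → Spec_lc_1165 keyboard word (lc_1165 keyboard word)

-- ===== LEMMAS AND PROOFS =====

-- weighted sum: pvW l = Σ_j (l.length - j) * l[j]; the sweep computes exactly this
def pvW : List Int → Int
  | [] => 0
  | d :: ds => ((ds.length : Int) + 1) * d + pvW ds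

theorem pvW_replicate (n : Nat) : pvW (List.replicate n 0) = 0 := by
  induction n with
  | zero => rfl
  | succ n ih => simp [List.replicate_succ, pvW, ih]

theorem pvSet_length (l : List Int) (i : Nat) (v : Int) :
    (pvSet l i v).length = l.length := by
  induction l generalizing i with
  | nil => rfl
  | cons d ds ih => cases i <;> simp [pvSet, ih]

theorem pvW_pvSet (l : List Int) (i : Nat) (v : Int) (h : i < l.length) :
    pvW (pvSet l i v) = pvW l + ((l.length : Int) - (i : Int)) * v := by
  induction l generalizing i with
  | nil => simp at h
  | cons d ds ih =>
    cases i with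
    | zero => simp [pvSet, pvW]; ring
    | succ i =>
      simp only [pvSet, pvW, pvSet_length, ih i (by simpa using h)]
      push_cast [List.length_cons]
      ring

theorem sweep_eq_pvW (l : List Int) (c0 t0 : Int) :
    (l.foldl (fun (p : Int × Int) d => (p.1 + d, p.2 + (p.1 + d))) (c0, t0)).2
      = t0 + (l.length : Int) * c0 + pvW l := by
  induction l generalizing c0 t0 with
  | nil => simp [pvW]
  | cons d ds ih =>
    simp only [List.foldl_cons, pvW, ih]
    push_cast [List.length_cons]
    ring

theorem find_singleton_bounds (kb : List Char) (c : Char) (hc : c ∈ kb) :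
    0 ≤ PySem.Chars.find kb [c] ∧ PySem.Chars.find kb [c] ≤ (kb.length : Int) := by
  obtain ⟨s, t, rfl⟩ := List.mem_iff_append.mp hc
  constructor
  · exact (PySem.Chars.find_nonneg_iff _ _).mpr ⟨s, t, by simp⟩
  · exact PySem.Chars.find_le_length _ _

-- loop invariant: the weighted sum of the running difference array tracks A's accumulator
theorem loop_inv (kb : List Char) (ws : List Char) :
    ∀ (diff : List Int) (x y : Int),
    (∀ c ∈ ws, c ∈ kb) → 0 ≤ y → y ≤ (kb.length : Int) →
    diff.length = kb.length + 1 →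
    pvW ((ws.foldl
      (fun (st : List Int × Int) (c : Char) =>
        let cur : Int := PySem.Chars.find kb [c]
        let lohi := if st.2 ≤ cur then (st.2, cur) else (cur, st.2)
        (pvSet (pvSet st.1 lohi.1.toNat 1) lohi.2.toNat (-1), cur))
      (diff, y)).1)
      = pvW diff + (ws.foldl
        (fun (st : Int × Int) (i : Char) =>
          let a : Int := PySem.Chars.find kb [i]
          (st.1 + |a - st.2|, a))
        (x, y)).1 - x := by
  induction ws with
  | nil => intro diff x y _ _ _ _; simp
  | cons c cs ih =>
    intro diff x y hall hy0 hyL hlen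
    obtain ⟨hcur0, hcurL⟩ := find_singleton_bounds kb c (hall c (by simp))
    set cur := PySem.Chars.find kb [c] with hcdef
    have hstep : ∀ lo hi : Int, 0 ≤ lo → hi ≤ (kb.length : Int) → lo ≤ hi →
        pvW (pvSet (pvSet diff lo.toNat 1) hi.toNat (-1)) = pvW diff + (hi - lo) := by
      intro lo hi hlo hhi hlohi
      have hloN : lo.toNat < diff.length := by omega
      have hhiN : hi.toNat < (pvSet diff lo.toNat 1).length := by
        rw [pvSet_length]; omega
      rw [pvW_pvSet _ _ _ hhiN, pvW_pvSet _ _ _ hloN, pvSet_length, hlen]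
      have h1 : ((lo.toNat : Int)) = lo := Int.toNat_of_nonneg hlo
      have h2 : ((hi.toNat : Int)) = hi := Int.toNat_of_nonneg (le_trans hlo hlohi)
      push_cast [h1, h2]
      ring
    by_cases hle : y ≤ cur
    · simp only [List.foldl_cons, ← hcdef, if_pos hle]
      rw [ih _ (x + |cur - y|) cur (fun c hc => hall c (by simp [hc])) hcur0 hcurL
        (by rw [pvSet_length, pvSet_length]; exact hlen)]
      rw [hstep y cur hy0 hcurL hle, abs_of_nonneg (by omega)]
      ring
    · simp only [List.foldl_cons, ← hcdef, if_neg hle]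
      rw [ih _ (x + |cur - y|) cur (fun c hc => hall c (by simp [hc])) hcur0 hcurL
        (by rw [pvSet_length, pvSet_length]; exact hlen)]
      rw [hstep cur y hcur0 hyL (by omega), abs_of_nonpos (by omega)]
      ring

-- ===== VERDICT (by name: the statement is the Claim_ definition above) =====
theorem lc_1165_spec : Claim_equal_lc_1165 := by
  intro keyboard word _ hpre
  unfold Spec_lc_1165 lc_1165 lc_1165_alt
  have hall : ∀ c ∈ word.toList, c ∈ keyboard.toList := by
    intro c hc
    have := List.all_eq_true.mp hpre c hc
    simpa using this
  rw [sweep_eq_pvW]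
  rw [loop_inv keyboard.toList word.toList _ 0 0 hall le_rfl (by positivity)
    (by simp)]
  simp [pvW_replicate]
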